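-- pv_equiv track=rewrite | github.com/Hanjuri/Baekjoon_juri | 백준/Silver/22233. 가희와 키워드/가희와 키워드.py | solution
-- ===== SOURCE A (Python) =====
-- def solution(N, M, keyword, arr):
--     answer = []
--     keySet = set(keyword)  # 키워드를 집합으로 변환
--     for a in arr:
--         usedKey = set(a)  # 현재 문장의 단어들을 집합으로 변환
--         keySet -= usedKey  # 키워드에서 사용된 단어 제거
--         answer.append(len(keySet))  # 남은 키워드 개수 추가
--     return answer
-- ===== SOURCE B (Python) =====
-- def solution(N, M, keyword, arr):
--     # Stateless alternative: for each statement index, count the distinct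
--     # keywords that do not occur anywhere in the prefix arr[:i+1].
--     keys = set(keyword)
--     out = []
--     for i in range(len(arr)):
--         used = [w for a in arr[:i + 1] for w in a]
--         out.append(sum(1 for k in keys if k not in used))
--     return out
-- ===== Notes on version B (the rewrite author's own statement) =====
-- stated objective: alternative
-- what changed: A carries a mutable keyword set across statements, shrinking it by set difference at each step; B is stateless: for each statement index it recomputes the count of distinct keywords absent from the flattened prefix of statements, trading the running accumulator for per-index prefix scans.
import Mathlib
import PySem

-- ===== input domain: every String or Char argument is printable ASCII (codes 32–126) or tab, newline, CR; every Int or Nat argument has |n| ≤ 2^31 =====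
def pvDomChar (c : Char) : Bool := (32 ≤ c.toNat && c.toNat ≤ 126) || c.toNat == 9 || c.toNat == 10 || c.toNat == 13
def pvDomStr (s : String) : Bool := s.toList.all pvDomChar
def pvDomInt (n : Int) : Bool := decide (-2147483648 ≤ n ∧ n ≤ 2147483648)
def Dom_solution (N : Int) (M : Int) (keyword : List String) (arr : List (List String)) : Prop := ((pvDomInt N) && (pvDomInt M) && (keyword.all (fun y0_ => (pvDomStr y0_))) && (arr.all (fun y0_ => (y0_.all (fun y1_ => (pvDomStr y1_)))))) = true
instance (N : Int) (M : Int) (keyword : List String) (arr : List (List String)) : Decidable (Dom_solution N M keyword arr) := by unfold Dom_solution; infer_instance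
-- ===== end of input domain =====

-- B replaces A's running keyword set (shrunk by set difference each step) with a stateless
-- per-index count of distinct keywords absent from the flattened statement prefix (alternative decomposition, not faster).

-- ===== PORT A =====
-- literal transliteration of A: keySet = set(keyword); for a in arr: keySet -= set(a); answer.append(len(keySet))
def solution (N : Int) (M : Int) (keyword : List String) (arr : List (List String)) : List Int :=
  (arr.foldl
    (fun (st : PySem.Set String × List Int) a =>
      let usedKey := PySem.Set.ofList a
      let keySet := PySem.Set.diff st.1 usedKey
      (keySet, st.2 ++ [PySem.Set.len keySet]))
    (PySem.Set.ofList keyword, ([] : List Int))).2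

-- ===== PORT B =====
-- literal transliteration of Source B: for i in range(len(arr)): used = [w for a in arr[:i+1] for w in a];
-- out.append(sum(1 for k in set(keyword) if k not in used)) — the sum over the set is a count, independent of iteration order
def solution_alt (N : Int) (M : Int) (keyword : List String) (arr : List (List String)) : List Int :=
  let keys := PySem.Set.ofList keyword
  (PySem.List.pyRange 0 (arr.length : Int) 1).map (fun i =>
    let used := (PySem.List.slice arr none (some (i + 1))).flatten
    (keys.countP (fun k => !used.contains k) : Int))

-- ===== PRECONDITION & SPEC =====
def Spec_solution (N : Int) (M : Int) (keyword : List String) (arr : List (List String)) (out : List Int) : Prop := out = solution_alt N M keyword arr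
instance (N : Int) (M : Int) (keyword : List String) (arr : List (List String)) (out : List Int) : Decidable (Spec_solution N M keyword arr out) := by unfold Spec_solution; infer_instance

-- ===== CLAIM (what is proved, stated in full; the proofs are below) =====
def Claim_equal_solution : Prop := ∀ (N : Int) (M : Int) (keyword : List String) (arr : List (List String)), Dom_solution N M keyword arr → Spec_solution N M keyword arr (solution N M keyword arr)

-- ===== LEMMAS AND PROOFS =====

-- the common reference value: for each index, the number of distinct keywords absent from the flattened prefix
def pvSpec (ks : List String) (arr : List (List String)) : List Int :=
  (List.range arr.length).map (fun n =>
    (ks.countP (fun k => !((arr.take (n + 1)).flatten.contains k)) : Int))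

lemma contains_ofList (a : List String) (x : String) :
    (PySem.Set.ofList a).contains x = a.contains x := by
  rw [Bool.eq_iff_iff]
  simp [PySem.Set.mem_ofList]

lemma loop_eq_spec (ks : PySem.Set String) (arr : List (List String)) (acc : List Int) :
    (arr.foldl
      (fun (st : PySem.Set String × List Int) a =>
        let usedKey := PySem.Set.ofList a
        let keySet := PySem.Set.diff st.1 usedKey
        (keySet, st.2 ++ [PySem.Set.len keySet]))
      (ks, acc)).2 = acc ++ pvSpec ks arr := by
  induction arr generalizing ks acc with
  | nil => simp [pvSpec]
  | cons a rest ih =>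
    simp only [List.foldl_cons]
    rw [ih]
    have hhead : PySem.Set.len (PySem.Set.diff ks (PySem.Set.ofList a))
        = (ks.countP (fun k => !(((a :: rest).take (0 + 1)).flatten.contains k)) : Int) := by
      simp [PySem.Set.len, PySem.Set.diff, List.countP_eq_length_filter]
    have htail : ∀ n : ℕ,
        ((PySem.Set.diff ks (PySem.Set.ofList a)).countP
          (fun k => !((rest.take (n + 1)).flatten.contains k)) : Int)
        = (ks.countP (fun k => !(((a :: rest).take (n + 1 + 1)).flatten.contains k)) : Int) := by
      intro n
      simp only [PySem.Set.diff, List.countP_filter, List.take_succ_cons, List.flatten_cons,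
        List.contains_append, Bool.not_or, contains_ofList]
      congr 2
      funext k
      exact Bool.and_comm _ _
    have hspec : pvSpec ks (a :: rest)
        = PySem.Set.len (PySem.Set.diff ks (PySem.Set.ofList a))
          :: pvSpec (PySem.Set.diff ks (PySem.Set.ofList a)) rest := by
      unfold pvSpec
      rw [List.length_cons, List.range_succ_eq_map, List.map_cons, List.map_map]
      refine congrArg₂ _ hhead.symm ?_
      refine List.map_congr_left (fun n _ => ?_)
      simpa using (htail n).symm
    rw [hspec]
    simp

lemma alt_eq_spec (N M : Int) (keyword : List String) (arr : List (List String)) :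
    solution_alt N M keyword arr = pvSpec (PySem.Set.ofList keyword) arr := by
  unfold solution_alt pvSpec
  rw [PySem.List.pyRange_zero_natCast, List.map_map]
  refine List.map_congr_left (fun n _ => ?_)
  have hcast : ((n : Int) + 1) = ((n + 1 : ℕ) : Int) := by push_cast; ring
  simp only [Function.comp, hcast, PySem.List.slice_to_natCast]

-- ===== VERDICT (by name: the statement is the Claim_ definition above) =====
theorem solution_spec : Claim_equal_solution := by
  intro N M keyword arr _
  show solution N M keyword arr = solution_alt N M keyword arr
  rw [alt_eq_spec]
  simpa using loop_eq_spec (PySem.Set.ofList keyword) arr []
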